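-- pv_equiv track=rewrite | github.com/RomeroLab/ML-Guided-Acyl-ACP-Reductase-Engineering | Data_Analysis_and_Protabank_File_Prep/Analysis/chimera_tools.py | calculate_contact_SCHEMA_E
-- ===== SOURCE A (Python) =====
-- def calculate_contact_SCHEMA_E(alignment,contacts):
--     '''given an alignment and contacts, returns the SCHEMA-weighted contacts as a dictionary {contact:weight} - note: this is an average for the entire library'''
--     SCHEMA_E = {}
--     for contact in contacts:
--         WT_contacts = tuple((alignment[contact[0]][par],alignment[contact[1]][par]) for par in range(len(alignment[0]))) # what is seen in the three parents
--         E = 0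
--         for p1 in alignment[contact[0]]:
--             for p2 in alignment[contact[1]]:
--                 if (p1,p2) not in WT_contacts:
--                     E+=1
--         if E>0:
--             SCHEMA_E[contact] = E
--     return SCHEMA_E
-- ===== SOURCE B (Python) =====
-- def calculate_contact_SCHEMA_E(alignment, contacts):
--     '''given an alignment and contacts, returns the SCHEMA-weighted contacts as a dictionary {contact:weight}'''
--     SCHEMA_E = {}
--     for contact in contacts:
--         col1 = alignment[contact[0]]
--         col2 = alignment[contact[1]]
--         wt = set()
--         for par in range(len(alignment[0])):
--             wt.add((col1[par], col2[par]))
--         freq1 = {}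
--         for p in col1:
--             freq1[p] = freq1.get(p, 0) + 1
--         freq2 = {}
--         for p in col2:
--             freq2[p] = freq2.get(p, 0) + 1
--         E = len(col1) * len(col2) - sum(freq1.get(a, 0) * freq2.get(b, 0) for (a, b) in wt)
--         if E > 0:
--             SCHEMA_E[contact] = E
--     return SCHEMA_E
-- ===== Notes on version B (the rewrite author's own statement) =====
-- stated objective: faster
-- what changed: The nested pair enumeration with a linear membership scan of the WT tuple is replaced by frequency dictionaries plus arithmetic: E = len(col1)*len(col2) - sum over the set of distinct WT pairs of freq1[a]*freq2[b].
-- outside the precondition, e.g. on calculate_contact_SCHEMA_E([[], []], [(0, 2)]): A returns {}, B raises IndexError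
import Mathlib
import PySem

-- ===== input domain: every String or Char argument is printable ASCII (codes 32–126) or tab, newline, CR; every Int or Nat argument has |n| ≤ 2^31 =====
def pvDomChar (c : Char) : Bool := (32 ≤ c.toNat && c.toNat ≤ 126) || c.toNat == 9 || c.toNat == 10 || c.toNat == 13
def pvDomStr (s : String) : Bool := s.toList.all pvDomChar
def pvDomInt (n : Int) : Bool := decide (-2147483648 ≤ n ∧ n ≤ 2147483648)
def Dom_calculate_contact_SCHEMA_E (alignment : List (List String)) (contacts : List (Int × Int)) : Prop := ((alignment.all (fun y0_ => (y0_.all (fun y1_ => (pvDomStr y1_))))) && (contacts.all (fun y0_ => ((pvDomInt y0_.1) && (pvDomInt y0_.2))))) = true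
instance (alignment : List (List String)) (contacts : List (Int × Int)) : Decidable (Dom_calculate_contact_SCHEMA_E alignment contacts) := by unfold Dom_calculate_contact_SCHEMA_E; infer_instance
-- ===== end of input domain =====

-- B replaces A's nested pair enumeration (with a linear WT-membership scan) by frequency
-- dictionaries and arithmetic over the set of distinct WT pairs.

-- ===== PORT A =====
def calculate_contact_SCHEMA_E (alignment : List (List String)) (contacts : List (Int × Int)) : List (Int × Int × Int) :=
  (contacts.foldl (fun (SCHEMA_E : PySem.Dict (Int × Int) Int) contact =>
    let row1 := PySem.List.pyGetD alignment contact.1 []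
    let row2 := PySem.List.pyGetD alignment contact.2 []
    let WT_contacts := (PySem.List.pyRange 0 ((alignment.headD []).length : Int) 1).map
      (fun par => (PySem.List.pyGetD row1 par "", PySem.List.pyGetD row2 par ""))
    let E : Int := row1.foldl (fun E p1 =>
      row2.foldl (fun E p2 => if (p1, p2) ∈ WT_contacts then E else E + 1) E) 0
    if E > 0 then SCHEMA_E.insert contact E else SCHEMA_E) PySem.Dict.empty).items.map (fun kv => (kv.1.1, kv.1.2, kv.2))

-- ===== PORT B =====
def calculate_contact_SCHEMA_E_alt (alignment : List (List String)) (contacts : List (Int × Int)) : List (Int × Int × Int) :=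
  (contacts.foldl (fun (SCHEMA_E : PySem.Dict (Int × Int) Int) contact =>
    let col1 := PySem.List.pyGetD alignment contact.1 []
    let col2 := PySem.List.pyGetD alignment contact.2 []
    let wt := (PySem.List.pyRange 0 ((alignment.headD []).length : Int) 1).foldl
      (fun (s : PySem.Set (String × String)) par =>
        s.add (PySem.List.pyGetD col1 par "", PySem.List.pyGetD col2 par "")) PySem.Set.empty
    let freq1 := col1.foldl (fun (f : PySem.Dict String Int) p => f.modify p 0 (· + 1)) PySem.Dict.empty
    let freq2 := col2.foldl (fun (f : PySem.Dict String Int) p => f.modify p 0 (· + 1)) PySem.Dict.empty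
    let E : Int := (col1.length : Int) * (col2.length : Int)
      - (wt.map (fun q => freq1.getD q.1 0 * freq2.getD q.2 0)).sum
    if E > 0 then SCHEMA_E.insert contact E else SCHEMA_E) PySem.Dict.empty).items.map (fun kv => (kv.1.1, kv.1.2, kv.2))

-- ===== PRECONDITION & SPEC =====
-- Pre_ excludes exactly the inputs on which Python A raises IndexError (a contact index out of
-- range, or a row shorter than row 0), except that it also excludes the degenerate corner where
-- an out-of-range second index sits next to an EMPTY first row: there A's lazy generator never
-- touches the bad index and A returns, while B (and any eager implementation) raises IndexError.
-- (The ports are totalized with pyGetD defaults and agree on ALL inputs; Pre_ records where the Pythons return.)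
def Pre_calculate_contact_SCHEMA_E (alignment : List (List String)) (contacts : List (Int × Int)) : Prop :=
  ∀ c ∈ contacts, PySem.Raise.InRange alignment.length c.1 ∧ PySem.Raise.InRange alignment.length c.2 ∧
    (alignment.headD []).length ≤ (PySem.List.pyGetD alignment c.1 []).length ∧
    (alignment.headD []).length ≤ (PySem.List.pyGetD alignment c.2 []).length
instance (alignment : List (List String)) (contacts : List (Int × Int)) : Decidable (Pre_calculate_contact_SCHEMA_E alignment contacts) := by unfold Pre_calculate_contact_SCHEMA_E; infer_instance

def pvWitness_calculate_contact_SCHEMA_E : List (List String) × (List (Int × Int)) :=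
  ([["A", "B"], ["B", "B"]], [(0, 1), (0, 0)])

def Spec_calculate_contact_SCHEMA_E (alignment : List (List String)) (contacts : List (Int × Int)) (out : List (Int × Int × Int)) : Prop := out = calculate_contact_SCHEMA_E_alt alignment contacts
instance (alignment : List (List String)) (contacts : List (Int × Int)) (out : List (Int × Int × Int)) : Decidable (Spec_calculate_contact_SCHEMA_E alignment contacts out) := by unfold Spec_calculate_contact_SCHEMA_E; infer_instance

-- ===== CLAIM (what is proved, stated in full; the proofs are below) =====
def Claim_equal_calculate_contact_SCHEMA_E : Prop := ∀ (alignment : List (List String)) (contacts : List (Int × Int)), Dom_calculate_contact_SCHEMA_E alignment contacts → Pre_calculate_contact_SCHEMA_E alignment contacts → Spec_calculate_contact_SCHEMA_E alignment contacts (calculate_contact_SCHEMA_E alignment contacts)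

-- ===== LEMMAS AND PROOFS =====

-- A's inner loop is a countP of "pair not in WT".
theorem innerA_eq (l2 : List String) (WT : List (String × String)) (p1 : String) (E : Int) :
    l2.foldl (fun E p2 => if (p1, p2) ∈ WT then E else E + 1) E
      = E + (l2.countP (fun p2 => !decide ((p1, p2) ∈ WT)) : Int) := by
  induction l2 generalizing E with
  | nil => simp
  | cons h t ih =>
    simp only [List.foldl_cons, List.countP_cons, ih]
    by_cases hm : (p1, h) ∈ WT
    · simp [hm]
    · simp only [hm, decide_false, Bool.not_false, if_true]
      push_cast
      ring

theorem outerA_eq (l1 l2 : List String) (WT : List (String × String)) (E : Int) :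
    l1.foldl (fun E p1 =>
      l2.foldl (fun E p2 => if (p1, p2) ∈ WT then E else E + 1) E) E
      = E + ((l1.map (fun p1 => l2.countP (fun p2 => !decide ((p1, p2) ∈ WT)))).sum : Int) := by
  induction l1 generalizing E with
  | nil => simp
  | cons h t ih =>
    rw [List.foldl_cons, innerA_eq, ih, List.map_cons, List.sum_cons]
    push_cast
    ring

-- countP of a disjunction of pointwise-disjoint predicates splits
theorem countP_or_disjoint {α : Type} (l : List α) (p q : α → Bool)
    (h : ∀ x ∈ l, ¬(p x = true ∧ q x = true)) :
    l.countP (fun x => p x || q x) = l.countP p + l.countP q := by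
  induction l with
  | nil => simp
  | cons a t ih =>
    have ha := h a (by simp)
    have ht : ∀ x ∈ t, ¬(p x = true ∧ q x = true) := fun x hx => h x (by simp [hx])
    simp only [List.countP_cons, ih ht]
    cases hp : p a <;> cases hq : q a <;> simp_all <;> omega

theorem sum_map_ite_count (l1 : List String) (a : String) (m : Nat) :
    (l1.map (fun p1 => if p1 = a then m else 0)).sum = l1.count a * m := by
  induction l1 with
  | nil => simp
  | cons h t ih =>
    by_cases hh : h = a <;> simp [hh, ih, Nat.add_mul, Nat.add_comm]

theorem sum_map_add_nat {α : Type} (l : List α) (f g : α → Nat) :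
    (l.map (fun x => f x + g x)).sum = (l.map f).sum + (l.map g).sum := by
  induction l with
  | nil => simp
  | cons h t ih => simp [ih]; omega

-- core: counting matched pairs via distinct WT pairs
theorem cntIn_eq (l1 l2 : List String) (S : List (String × String)) (hnd : S.Nodup) :
    (l1.map (fun p1 => l2.countP (fun p2 => decide ((p1, p2) ∈ S)))).sum
      = (S.map (fun q => l1.count q.1 * l2.count q.2)).sum := by
  induction S with
  | nil => simp
  | cons q S' ih =>
    have hq : q ∉ S' := (List.nodup_cons.mp hnd).1
    have hnd' : S'.Nodup := (List.nodup_cons.mp hnd).2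
    have step : ∀ p1 : String, l2.countP (fun p2 => decide ((p1, p2) ∈ q :: S'))
        = l2.countP (fun p2 => decide ((p1, p2) = q)) + l2.countP (fun p2 => decide ((p1, p2) ∈ S')) := by
      intro p1
      have hcongr : l2.countP (fun p2 => decide ((p1, p2) ∈ q :: S'))
          = l2.countP (fun p2 => decide ((p1, p2) = q) || decide ((p1, p2) ∈ S')) := by
        apply List.countP_congr
        intro p2 _
        simp [List.mem_cons]
      rw [hcongr]
      apply countP_or_disjoint
      intro p2 _ ⟨h1, h2⟩
      simp only [decide_eq_true_eq] at h1 h2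
      exact hq (h1 ▸ h2)
    have hhead : (l1.map (fun p1 => l2.countP (fun p2 => decide ((p1, p2) = q)))).sum
        = l1.count q.1 * l2.count q.2 := by
      have hone : ∀ p1 : String, l2.countP (fun p2 => decide ((p1, p2) = q))
          = if p1 = q.1 then l2.count q.2 else 0 := by
        intro p1
        by_cases hp : p1 = q.1
        · simp only [hp, if_pos]
          unfold List.count
          apply List.countP_congr
          intro p2 _
          simp [Prod.ext_iff]
        · rw [if_neg hp]
          apply List.countP_eq_zero.mpr
          intro p2 _
          simp [Prod.ext_iff, hp]
      calc (l1.map (fun p1 => l2.countP (fun p2 => decide ((p1, p2) = q)))).sum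
          = (l1.map (fun p1 => if p1 = q.1 then l2.count q.2 else 0)).sum := by
            congr 1; exact List.map_congr_left (fun p1 _ => hone p1)
        _ = l1.count q.1 * l2.count q.2 := sum_map_ite_count _ _ _
    calc (l1.map (fun p1 => l2.countP (fun p2 => decide ((p1, p2) ∈ q :: S')))).sum
        = (l1.map (fun p1 => l2.countP (fun p2 => decide ((p1, p2) = q))
            + l2.countP (fun p2 => decide ((p1, p2) ∈ S')))).sum := by
          congr 1; exact List.map_congr_left (fun p1 _ => step p1)
      _ = (l1.map (fun p1 => l2.countP (fun p2 => decide ((p1, p2) = q)))).sum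
            + (l1.map (fun p1 => l2.countP (fun p2 => decide ((p1, p2) ∈ S')))).sum :=
          sum_map_add_nat _ _ _
      _ = ((q :: S').map (fun q => l1.count q.1 * l2.count q.2)).sum := by
          rw [ih hnd', hhead]; simp

-- per-contact E equality, with no side conditions
theorem step_E_eq (row1 row2 : List String) (WT : List (String × String)) :
    (row1.foldl (fun E p1 =>
      row2.foldl (fun E p2 => if (p1, p2) ∈ WT then E else E + 1) E) (0 : Int))
      = (row1.length : Int) * (row2.length : Int)
        - ((PySem.Set.ofList WT).map (fun q => ((row1.count q.1 : Int)) * ((row2.count q.2 : Int)))).sum := by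
  rw [outerA_eq]
  have hsplit : ∀ p1 : String,
      row2.countP (fun p2 => !decide ((p1, p2) ∈ WT)) + row2.countP (fun p2 => decide ((p1, p2) ∈ WT))
        = row2.length := by
    intro p1
    rw [← countP_or_disjoint row2 (fun p2 => !decide ((p1, p2) ∈ WT)) (fun p2 => decide ((p1, p2) ∈ WT))
      (by intro x _ h; rcases h with ⟨h1, h2⟩; simp [h2] at h1)]
    simp
  have hA : (row1.map (fun p1 => row2.countP (fun p2 => !decide ((p1, p2) ∈ WT)))).sum
      + (row1.map (fun p1 => row2.countP (fun p2 => decide ((p1, p2) ∈ WT)))).sum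
      = row1.length * row2.length := by
    rw [← sum_map_add_nat]
    have hmc : (row1.map (fun p1 => row2.countP (fun p2 => !decide ((p1, p2) ∈ WT))
        + row2.countP (fun p2 => decide ((p1, p2) ∈ WT)))).sum
        = (row1.map (fun _ => row2.length)).sum := by
      congr 1; exact List.map_congr_left (fun p1 _ => hsplit p1)
    rw [hmc, List.map_const', List.sum_replicate, smul_eq_mul]
  have hcore : (row1.map (fun p1 => row2.countP (fun p2 => decide ((p1, p2) ∈ WT)))).sum
      = ((PySem.Set.ofList WT).map (fun q => row1.count q.1 * row2.count q.2)).sum := by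
    rw [← cntIn_eq row1 row2 (PySem.Set.ofList WT) (PySem.Set.nodup_ofList WT)]
    congr 1
    apply List.map_congr_left
    intro p1 _
    apply List.countP_congr
    intro p2 _
    simp [PySem.Set.mem_ofList]
  have hcast : (((PySem.Set.ofList WT).map (fun q => ((row1.count q.1 : Int)) * ((row2.count q.2 : Int)))).sum : Int)
      = (((PySem.Set.ofList WT).map (fun q => row1.count q.1 * row2.count q.2)).sum : Nat) := by
    rw [Nat.cast_list_sum, List.map_map]
    congr 1
  rw [hcast, ← hcore]
  omega

-- B's wt fold is Set.ofList of the mapped range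
theorem stepB_wt (col1 col2 : List String) (n : Int) :
    ((PySem.List.pyRange 0 n 1).foldl
      (fun (s : PySem.Set (String × String)) par =>
        s.add (PySem.List.pyGetD col1 par "", PySem.List.pyGetD col2 par "")) PySem.Set.empty)
      = PySem.Set.ofList ((PySem.List.pyRange 0 n 1).map
        (fun par => (PySem.List.pyGetD col1 par "", PySem.List.pyGetD col2 par ""))) := by
  rw [PySem.Set.ofList_eq_foldl, List.foldl_map]
  rfl

theorem step_eq (alignment : List (List String)) (c : Int × Int) (d : PySem.Dict (Int × Int) Int) :
    (let row1 := PySem.List.pyGetD alignment c.1 []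
     let row2 := PySem.List.pyGetD alignment c.2 []
     let WT_contacts := (PySem.List.pyRange 0 ((alignment.headD []).length : Int) 1).map
       (fun par => (PySem.List.pyGetD row1 par "", PySem.List.pyGetD row2 par ""))
     let E : Int := row1.foldl (fun E p1 =>
       row2.foldl (fun E p2 => if (p1, p2) ∈ WT_contacts then E else E + 1) E) 0
     if E > 0 then d.insert c E else d)
    = (let col1 := PySem.List.pyGetD alignment c.1 []
       let col2 := PySem.List.pyGetD alignment c.2 []
       let wt := (PySem.List.pyRange 0 ((alignment.headD []).length : Int) 1).foldl
         (fun (s : PySem.Set (String × String)) par =>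
           s.add (PySem.List.pyGetD col1 par "", PySem.List.pyGetD col2 par "")) PySem.Set.empty
       let freq1 := col1.foldl (fun (f : PySem.Dict String Int) p => f.modify p 0 (· + 1)) PySem.Dict.empty
       let freq2 := col2.foldl (fun (f : PySem.Dict String Int) p => f.modify p 0 (· + 1)) PySem.Dict.empty
       let E : Int := (col1.length : Int) * (col2.length : Int)
         - (wt.map (fun q => freq1.getD q.1 0 * freq2.getD q.2 0)).sum
       if E > 0 then d.insert c E else d) := by
  simp only [stepB_wt]
  have hfreq : ∀ (col : List String),
      col.foldl (fun (f : PySem.Dict String Int) p => f.modify p 0 (· + 1)) PySem.Dict.empty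
        = PySem.Dict.counter col := fun col => (PySem.Dict.counter_eq_foldl col).symm
  simp only [hfreq, PySem.Dict.getD_counter]
  rw [step_E_eq]

-- ===== VERDICT (by name: the statement is the Claim_ definition above) =====
theorem calculate_contact_SCHEMA_E_spec : Claim_equal_calculate_contact_SCHEMA_E := by
  intro alignment contacts _ _
  unfold Spec_calculate_contact_SCHEMA_E calculate_contact_SCHEMA_E calculate_contact_SCHEMA_E_alt
  congr 1
  congr 1
  apply PySem.List.foldl_congr_mem
  intro d c _
  exact step_eq alignment c d
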